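-- pv_equiv track=rewrite | github.com/kdvkrs/aoc22 | day25/part1.py | snafu
-- ===== SOURCE A (Python) =====
-- S = ["=","-","0","1","2"]
--
-- def snafu(dec: int):
--     sn, c = "", 0
--     while dec > 0:
--         v = dec%5+c
--         sn = S[(v+2)%5] + sn
--         c = 1 if v > 2 else 0
--         dec //= 5
--     return "1"+sn if c else sn
-- ===== SOURCE B (Python) =====
-- S = ["=","-","0","1","2"]
--
-- def snafu(dec: int):
--     if dec <= 0:
--         return ""
--     r = dec % 5
--     if r <= 2:
--         return snafu(dec // 5) + S[r + 2]
--     return snafu(dec // 5 + 1) + S[r - 3]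
-- ===== Notes on version B (the rewrite author's own statement) =====
-- stated objective: simpler
-- what changed: Replaced the iterative while-loop that threads an explicit carry flag and prepends digits to an accumulator string (plus a final carry patch-up) with a direct recursion on the quotient that folds the balanced-base-5 carry into the recursive argument (dec//5 or dec//5+1).
import Mathlib
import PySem

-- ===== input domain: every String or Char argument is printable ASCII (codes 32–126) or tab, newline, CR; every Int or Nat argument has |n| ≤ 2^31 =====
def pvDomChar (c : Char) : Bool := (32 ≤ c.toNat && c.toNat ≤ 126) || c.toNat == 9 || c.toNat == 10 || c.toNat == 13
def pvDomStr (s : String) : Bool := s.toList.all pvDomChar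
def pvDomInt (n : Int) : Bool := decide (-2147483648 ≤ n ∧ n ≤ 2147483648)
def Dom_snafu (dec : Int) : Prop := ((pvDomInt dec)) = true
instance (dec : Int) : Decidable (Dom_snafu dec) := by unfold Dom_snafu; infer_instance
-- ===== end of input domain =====

-- B replaces A's carry-threading while loop with a recursion on the quotient that folds the
-- balanced-base-5 carry into the recursive argument (objective: simpler).

-- ===== PORT A =====
def S5 : List String := ["=", "-", "0", "1", "2"]

-- the index (v+2)%5 is always in 0..4, so the `.getD ""` default (Python's IndexError) never fires
def snafuLoop (dec : Int) (sn : String) (c : Int) : String :=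
  if dec > 0 then
    let v := PySem.Int.mod dec 5 + c
    snafuLoop (PySem.Int.floordiv dec 5)
      (((PySem.List.pyGet? S5 (PySem.Int.mod (v + 2) 5)).getD "") ++ sn)
      (if v > 2 then 1 else 0)
  else
    if c ≠ 0 then "1" ++ sn else sn
termination_by dec.toNat
decreasing_by
  rw [PySem.Int.floordiv_eq_ediv_of_pos (by norm_num)]
  omega

def snafu (dec : Int) : String := snafuLoop dec "" 0

-- ===== PORT B =====
-- indices r+2 and r-3 are always in 0..4, so the `.getD ""` default never fires
def snafu_alt (dec : Int) : String :=
  if dec ≤ 0 then ""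
  else
    let r := PySem.Int.mod dec 5
    if r ≤ 2 then
      snafu_alt (PySem.Int.floordiv dec 5) ++ ((PySem.List.pyGet? S5 (r + 2)).getD "")
    else
      snafu_alt (PySem.Int.floordiv dec 5 + 1) ++ ((PySem.List.pyGet? S5 (r - 3)).getD "")
termination_by dec.toNat
decreasing_by
  · rw [PySem.Int.floordiv_eq_ediv_of_pos (by norm_num)]
    omega
  · rename_i hpos hr
    have hr' : ¬ PySem.Int.mod dec 5 ≤ 2 := hr
    rw [PySem.Int.mod_eq_emod_of_pos (by norm_num)] at hr'
    rw [PySem.Int.floordiv_eq_ediv_of_pos (by norm_num)]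
    omega

-- ===== PRECONDITION & SPEC =====
def Spec_snafu (dec : Int) (out : String) : Prop := out = snafu_alt dec
instance (dec : Int) (out : String) : Decidable (Spec_snafu dec out) := by unfold Spec_snafu; infer_instance

-- ===== CLAIM (what is proved, stated in full; the proofs are below) =====
def Claim_equal_snafu : Prop := ∀ (dec : Int), Dom_snafu dec → Spec_snafu dec (snafu dec)

-- ===== LEMMAS AND PROOFS =====

-- Loop invariant: with 0 ≤ dec and carry c ∈ {0,1}, A's loop computes B's value of dec + c,
-- prepended to the accumulator sn.
theorem snafuLoop_eq : ∀ (n : Nat) (dec c : Int) (sn : String), dec.toNat = n → 0 ≤ dec →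
    (c = 0 ∨ c = 1) → snafuLoop dec sn c = snafu_alt (dec + c) ++ sn := by
  intro n
  induction n using Nat.strong_induction_on with
  | _ n ih =>
    intro dec c sn hn hd hc
    rw [snafuLoop]
    by_cases hpos : dec > 0
    · rw [if_pos hpos]
      have h5 : (0:Int) < 5 := by norm_num
      simp only [PySem.Int.mod_eq_emod_of_pos h5, PySem.Int.floordiv_eq_ediv_of_pos h5]
      have hm : dec % 5 = 0 ∨ dec % 5 = 1 ∨ dec % 5 = 2 ∨ dec % 5 = 3 ∨ dec % 5 = 4 := by omega
      rcases hc with rfl | rfl <;> rcases hm with hm | hm | hm | hm | hm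
      · -- c = 0, dec %% 5 = 0
        have hih : snafuLoop (dec / 5) ("0" ++ sn) 0 = snafu_alt (dec / 5) ++ ("0" ++ sn) := by
          have h := ih (dec / 5).toNat (by omega) (dec / 5) 0 ("0" ++ sn) rfl (by omega) (by norm_num)
          simpa using h
        have hq : (dec) / 5 = dec / 5 := by omega
        have hr : (dec) % 5 = 0 := by omega
        have hp2 : ¬ ((dec) ≤ 0) := by omega
        rw [hm]
        norm_num [S5, PySem.List.pyGet?, PySem.List.pyIdx?, show ((0:Int)).toNat = 0 from rfl, show ((1:Int)).toNat = 1 from rfl, show ((2:Int)).toNat = 2 from rfl, show ((3:Int)).toNat = 3 from rfl, show ((4:Int)).toNat = 4 from rfl]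
        rw [hih]
        conv_rhs => rw [snafu_alt]
        simp only [PySem.Int.mod_eq_emod_of_pos h5, PySem.Int.floordiv_eq_ediv_of_pos h5]
        rw [if_neg hp2]; try rw [hq]
        norm_num [hr, S5, PySem.List.pyGet?, PySem.List.pyIdx?, show ((0:Int)).toNat = 0 from rfl, show ((1:Int)).toNat = 1 from rfl, show ((2:Int)).toNat = 2 from rfl, show ((3:Int)).toNat = 3 from rfl, show ((4:Int)).toNat = 4 from rfl, String.append_assoc]
      · -- c = 0, dec %% 5 = 1
        have hih : snafuLoop (dec / 5) ("1" ++ sn) 0 = snafu_alt (dec / 5) ++ ("1" ++ sn) := by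
          have h := ih (dec / 5).toNat (by omega) (dec / 5) 0 ("1" ++ sn) rfl (by omega) (by norm_num)
          simpa using h
        have hq : (dec) / 5 = dec / 5 := by omega
        have hr : (dec) % 5 = 1 := by omega
        have hp2 : ¬ ((dec) ≤ 0) := by omega
        rw [hm]
        norm_num [S5, PySem.List.pyGet?, PySem.List.pyIdx?, show ((0:Int)).toNat = 0 from rfl, show ((1:Int)).toNat = 1 from rfl, show ((2:Int)).toNat = 2 from rfl, show ((3:Int)).toNat = 3 from rfl, show ((4:Int)).toNat = 4 from rfl]
        rw [hih]
        conv_rhs => rw [snafu_alt]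
        simp only [PySem.Int.mod_eq_emod_of_pos h5, PySem.Int.floordiv_eq_ediv_of_pos h5]
        rw [if_neg hp2]; try rw [hq]
        norm_num [hr, S5, PySem.List.pyGet?, PySem.List.pyIdx?, show ((0:Int)).toNat = 0 from rfl, show ((1:Int)).toNat = 1 from rfl, show ((2:Int)).toNat = 2 from rfl, show ((3:Int)).toNat = 3 from rfl, show ((4:Int)).toNat = 4 from rfl, String.append_assoc]
      · -- c = 0, dec %% 5 = 2
        have hih : snafuLoop (dec / 5) ("2" ++ sn) 0 = snafu_alt (dec / 5) ++ ("2" ++ sn) := by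
          have h := ih (dec / 5).toNat (by omega) (dec / 5) 0 ("2" ++ sn) rfl (by omega) (by norm_num)
          simpa using h
        have hq : (dec) / 5 = dec / 5 := by omega
        have hr : (dec) % 5 = 2 := by omega
        have hp2 : ¬ ((dec) ≤ 0) := by omega
        rw [hm]
        norm_num [S5, PySem.List.pyGet?, PySem.List.pyIdx?, show ((0:Int)).toNat = 0 from rfl, show ((1:Int)).toNat = 1 from rfl, show ((2:Int)).toNat = 2 from rfl, show ((3:Int)).toNat = 3 from rfl, show ((4:Int)).toNat = 4 from rfl]
        rw [hih]
        conv_rhs => rw [snafu_alt]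
        simp only [PySem.Int.mod_eq_emod_of_pos h5, PySem.Int.floordiv_eq_ediv_of_pos h5]
        rw [if_neg hp2]; try rw [hq]
        norm_num [hr, S5, PySem.List.pyGet?, PySem.List.pyIdx?, show ((0:Int)).toNat = 0 from rfl, show ((1:Int)).toNat = 1 from rfl, show ((2:Int)).toNat = 2 from rfl, show ((3:Int)).toNat = 3 from rfl, show ((4:Int)).toNat = 4 from rfl, String.append_assoc]
      · -- c = 0, dec %% 5 = 3
        have hih : snafuLoop (dec / 5) ("=" ++ sn) 1 = snafu_alt (dec / 5 + 1) ++ ("=" ++ sn) := by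
          have h := ih (dec / 5).toNat (by omega) (dec / 5) 1 ("=" ++ sn) rfl (by omega) (by norm_num)
          simpa using h
        have hq : (dec) / 5 = dec / 5 := by omega
        have hr : (dec) % 5 = 3 := by omega
        have hp2 : ¬ ((dec) ≤ 0) := by omega
        rw [hm]
        norm_num [S5, PySem.List.pyGet?, PySem.List.pyIdx?, show ((0:Int)).toNat = 0 from rfl, show ((1:Int)).toNat = 1 from rfl, show ((2:Int)).toNat = 2 from rfl, show ((3:Int)).toNat = 3 from rfl, show ((4:Int)).toNat = 4 from rfl]
        rw [hih]
        conv_rhs => rw [snafu_alt]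
        simp only [PySem.Int.mod_eq_emod_of_pos h5, PySem.Int.floordiv_eq_ediv_of_pos h5]
        rw [if_neg hp2]; try rw [hq]
        norm_num [hr, S5, PySem.List.pyGet?, PySem.List.pyIdx?, show ((0:Int)).toNat = 0 from rfl, show ((1:Int)).toNat = 1 from rfl, show ((2:Int)).toNat = 2 from rfl, show ((3:Int)).toNat = 3 from rfl, show ((4:Int)).toNat = 4 from rfl, String.append_assoc]
      · -- c = 0, dec %% 5 = 4
        have hih : snafuLoop (dec / 5) ("-" ++ sn) 1 = snafu_alt (dec / 5 + 1) ++ ("-" ++ sn) := by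
          have h := ih (dec / 5).toNat (by omega) (dec / 5) 1 ("-" ++ sn) rfl (by omega) (by norm_num)
          simpa using h
        have hq : (dec) / 5 = dec / 5 := by omega
        have hr : (dec) % 5 = 4 := by omega
        have hp2 : ¬ ((dec) ≤ 0) := by omega
        rw [hm]
        norm_num [S5, PySem.List.pyGet?, PySem.List.pyIdx?, show ((0:Int)).toNat = 0 from rfl, show ((1:Int)).toNat = 1 from rfl, show ((2:Int)).toNat = 2 from rfl, show ((3:Int)).toNat = 3 from rfl, show ((4:Int)).toNat = 4 from rfl]
        rw [hih]
        conv_rhs => rw [snafu_alt]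
        simp only [PySem.Int.mod_eq_emod_of_pos h5, PySem.Int.floordiv_eq_ediv_of_pos h5]
        rw [if_neg hp2]; try rw [hq]
        norm_num [hr, S5, PySem.List.pyGet?, PySem.List.pyIdx?, show ((0:Int)).toNat = 0 from rfl, show ((1:Int)).toNat = 1 from rfl, show ((2:Int)).toNat = 2 from rfl, show ((3:Int)).toNat = 3 from rfl, show ((4:Int)).toNat = 4 from rfl, String.append_assoc]
      · -- c = 1, dec %% 5 = 0
        have hih : snafuLoop (dec / 5) ("1" ++ sn) 0 = snafu_alt (dec / 5) ++ ("1" ++ sn) := by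
          have h := ih (dec / 5).toNat (by omega) (dec / 5) 0 ("1" ++ sn) rfl (by omega) (by norm_num)
          simpa using h
        have hq : (dec + 1) / 5 = dec / 5 := by omega
        have hr : (dec + 1) % 5 = 1 := by omega
        have hp2 : ¬ ((dec + 1) ≤ 0) := by omega
        rw [hm]
        norm_num [S5, PySem.List.pyGet?, PySem.List.pyIdx?, show ((0:Int)).toNat = 0 from rfl, show ((1:Int)).toNat = 1 from rfl, show ((2:Int)).toNat = 2 from rfl, show ((3:Int)).toNat = 3 from rfl, show ((4:Int)).toNat = 4 from rfl]
        rw [hih]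
        conv_rhs => rw [snafu_alt]
        simp only [PySem.Int.mod_eq_emod_of_pos h5, PySem.Int.floordiv_eq_ediv_of_pos h5]
        rw [if_neg hp2]; try rw [hq]
        norm_num [hr, S5, PySem.List.pyGet?, PySem.List.pyIdx?, show ((0:Int)).toNat = 0 from rfl, show ((1:Int)).toNat = 1 from rfl, show ((2:Int)).toNat = 2 from rfl, show ((3:Int)).toNat = 3 from rfl, show ((4:Int)).toNat = 4 from rfl, String.append_assoc]
      · -- c = 1, dec %% 5 = 1
        have hih : snafuLoop (dec / 5) ("2" ++ sn) 0 = snafu_alt (dec / 5) ++ ("2" ++ sn) := by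
          have h := ih (dec / 5).toNat (by omega) (dec / 5) 0 ("2" ++ sn) rfl (by omega) (by norm_num)
          simpa using h
        have hq : (dec + 1) / 5 = dec / 5 := by omega
        have hr : (dec + 1) % 5 = 2 := by omega
        have hp2 : ¬ ((dec + 1) ≤ 0) := by omega
        rw [hm]
        norm_num [S5, PySem.List.pyGet?, PySem.List.pyIdx?, show ((0:Int)).toNat = 0 from rfl, show ((1:Int)).toNat = 1 from rfl, show ((2:Int)).toNat = 2 from rfl, show ((3:Int)).toNat = 3 from rfl, show ((4:Int)).toNat = 4 from rfl]
        rw [hih]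
        conv_rhs => rw [snafu_alt]
        simp only [PySem.Int.mod_eq_emod_of_pos h5, PySem.Int.floordiv_eq_ediv_of_pos h5]
        rw [if_neg hp2]; try rw [hq]
        norm_num [hr, S5, PySem.List.pyGet?, PySem.List.pyIdx?, show ((0:Int)).toNat = 0 from rfl, show ((1:Int)).toNat = 1 from rfl, show ((2:Int)).toNat = 2 from rfl, show ((3:Int)).toNat = 3 from rfl, show ((4:Int)).toNat = 4 from rfl, String.append_assoc]
      · -- c = 1, dec %% 5 = 2
        have hih : snafuLoop (dec / 5) ("=" ++ sn) 1 = snafu_alt (dec / 5 + 1) ++ ("=" ++ sn) := by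
          have h := ih (dec / 5).toNat (by omega) (dec / 5) 1 ("=" ++ sn) rfl (by omega) (by norm_num)
          simpa using h
        have hq : (dec + 1) / 5 = dec / 5 := by omega
        have hr : (dec + 1) % 5 = 3 := by omega
        have hp2 : ¬ ((dec + 1) ≤ 0) := by omega
        rw [hm]
        norm_num [S5, PySem.List.pyGet?, PySem.List.pyIdx?, show ((0:Int)).toNat = 0 from rfl, show ((1:Int)).toNat = 1 from rfl, show ((2:Int)).toNat = 2 from rfl, show ((3:Int)).toNat = 3 from rfl, show ((4:Int)).toNat = 4 from rfl]
        rw [hih]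
        conv_rhs => rw [snafu_alt]
        simp only [PySem.Int.mod_eq_emod_of_pos h5, PySem.Int.floordiv_eq_ediv_of_pos h5]
        rw [if_neg hp2]; try rw [hq]
        norm_num [hr, S5, PySem.List.pyGet?, PySem.List.pyIdx?, show ((0:Int)).toNat = 0 from rfl, show ((1:Int)).toNat = 1 from rfl, show ((2:Int)).toNat = 2 from rfl, show ((3:Int)).toNat = 3 from rfl, show ((4:Int)).toNat = 4 from rfl, String.append_assoc]
      · -- c = 1, dec %% 5 = 3
        have hih : snafuLoop (dec / 5) ("-" ++ sn) 1 = snafu_alt (dec / 5 + 1) ++ ("-" ++ sn) := by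
          have h := ih (dec / 5).toNat (by omega) (dec / 5) 1 ("-" ++ sn) rfl (by omega) (by norm_num)
          simpa using h
        have hq : (dec + 1) / 5 = dec / 5 := by omega
        have hr : (dec + 1) % 5 = 4 := by omega
        have hp2 : ¬ ((dec + 1) ≤ 0) := by omega
        rw [hm]
        norm_num [S5, PySem.List.pyGet?, PySem.List.pyIdx?, show ((0:Int)).toNat = 0 from rfl, show ((1:Int)).toNat = 1 from rfl, show ((2:Int)).toNat = 2 from rfl, show ((3:Int)).toNat = 3 from rfl, show ((4:Int)).toNat = 4 from rfl]
        rw [hih]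
        conv_rhs => rw [snafu_alt]
        simp only [PySem.Int.mod_eq_emod_of_pos h5, PySem.Int.floordiv_eq_ediv_of_pos h5]
        rw [if_neg hp2]; try rw [hq]
        norm_num [hr, S5, PySem.List.pyGet?, PySem.List.pyIdx?, show ((0:Int)).toNat = 0 from rfl, show ((1:Int)).toNat = 1 from rfl, show ((2:Int)).toNat = 2 from rfl, show ((3:Int)).toNat = 3 from rfl, show ((4:Int)).toNat = 4 from rfl, String.append_assoc]
      · -- c = 1, dec %% 5 = 4
        have hih : snafuLoop (dec / 5) ("0" ++ sn) 1 = snafu_alt (dec / 5 + 1) ++ ("0" ++ sn) := by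
          have h := ih (dec / 5).toNat (by omega) (dec / 5) 1 ("0" ++ sn) rfl (by omega) (by norm_num)
          simpa using h
        have hq : (dec + 1) / 5 = dec / 5 + 1 := by omega
        have hr : (dec + 1) % 5 = 0 := by omega
        have hp2 : ¬ ((dec + 1) ≤ 0) := by omega
        rw [hm]
        norm_num [S5, PySem.List.pyGet?, PySem.List.pyIdx?, show ((0:Int)).toNat = 0 from rfl, show ((1:Int)).toNat = 1 from rfl, show ((2:Int)).toNat = 2 from rfl, show ((3:Int)).toNat = 3 from rfl, show ((4:Int)).toNat = 4 from rfl]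
        rw [hih]
        conv_rhs => rw [snafu_alt]
        simp only [PySem.Int.mod_eq_emod_of_pos h5, PySem.Int.floordiv_eq_ediv_of_pos h5]
        rw [if_neg hp2]; try rw [hq]
        norm_num [hr, S5, PySem.List.pyGet?, PySem.List.pyIdx?, show ((0:Int)).toNat = 0 from rfl, show ((1:Int)).toNat = 1 from rfl, show ((2:Int)).toNat = 2 from rfl, show ((3:Int)).toNat = 3 from rfl, show ((4:Int)).toNat = 4 from rfl, String.append_assoc]
    · have hz : dec = 0 := by omega
      subst hz
      simp only [if_neg hpos]
      rcases hc with rfl | rfl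
      · simp [snafu_alt]
      · rw [snafu_alt]
        norm_num [PySem.Int.mod_eq_emod_of_pos (show (0:Int) < 5 by norm_num),
          PySem.Int.floordiv_eq_ediv_of_pos (show (0:Int) < 5 by norm_num)]
        rw [snafu_alt]
        simp [PySem.List.pyGet?, S5, PySem.List.pyIdx?]

-- ===== VERDICT (by name: the statement is the Claim_ definition above) =====
theorem snafu_spec : Claim_equal_snafu := by
  intro dec _
  unfold Spec_snafu snafu
  by_cases h : 0 ≤ dec
  · simpa using snafuLoop_eq dec.toNat dec 0 "" rfl h (Or.inl rfl)
  · rw [snafuLoop, snafu_alt]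
    simp only [if_neg (by omega : ¬ dec > 0), if_pos (by omega : dec ≤ 0)]
    simp
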